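-- pv_equiv track=rewrite | github.com/epinay197/tradelog | trade_analytics.py | get_time_block
-- ===== SOURCE A (Python) =====
-- TIME_BLOCKS = [
--     ("09:30-10:30", (9, 30), (10, 30)),
--     ("10:30-11:30", (10, 30), (11, 30)),
--     ("11:30-12:30", (11, 30), (12, 30)),
--     ("12:30-13:30", (12, 30), (13, 30)),
--     ("13:30-14:30", (13, 30), (14, 30)),
--     ("14:30-15:30", (14, 30), (15, 30)),
--     ("15:30-16:00", (15, 30), (16, 0)),
-- ]
--
-- def time_to_minutes(t_str):
--     try:
--         h, m = map(int, t_str.split(":"))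
--         return h * 60 + m
--     except Exception:
--         return -1
--
-- def get_time_block(t_str):
--     mins = time_to_minutes(t_str)
--     if mins < 0:
--         return "Unknown"
--     for label, (sh, sm), (eh, em) in TIME_BLOCKS:
--         if sh * 60 + sm <= mins < eh * 60 + em:
--             return label
--     if mins < 9 * 60 + 30:
--         return "Pre-market"
--     return "After-hours"
-- ===== SOURCE B (Python) =====
-- def time_to_minutes(t_str):
--     try:
--         h, m = map(int, t_str.split(":"))
--         return h * 60 + m
--     except Exception:
--         return -1
--
-- def get_time_block(t_str):
--     mins = time_to_minutes(t_str)
--     if mins < 0: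
--         return "Unknown"
--     if mins < 570:
--         return "Pre-market"
--     if mins >= 960:
--         return "After-hours"
--     start = 570 + 60 * ((mins - 570) // 60)
--     end = min(start + 60, 960)
--     return "%02d:%02d-%02d:%02d" % (start // 60, start % 60, end // 60, end % 60)
-- ===== Notes on version B (the rewrite author's own statement) =====
-- stated objective: alternative
-- what changed: replaces the linear scan over the TIME_BLOCKS table with direct arithmetic: the block index is (mins-570)//60, its bounds are computed and the label is formatted with %02d, capping the last block's end at 16:00
import Mathlib
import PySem

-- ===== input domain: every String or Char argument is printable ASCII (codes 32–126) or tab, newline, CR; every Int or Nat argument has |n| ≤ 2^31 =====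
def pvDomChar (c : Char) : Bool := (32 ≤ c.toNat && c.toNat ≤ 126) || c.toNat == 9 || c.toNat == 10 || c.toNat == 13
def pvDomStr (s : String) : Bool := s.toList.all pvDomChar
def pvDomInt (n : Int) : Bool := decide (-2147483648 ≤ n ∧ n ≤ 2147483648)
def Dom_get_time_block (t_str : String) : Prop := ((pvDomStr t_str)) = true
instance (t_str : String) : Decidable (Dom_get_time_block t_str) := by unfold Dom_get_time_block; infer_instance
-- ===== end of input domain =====

-- B replaces A's linear scan over the TIME_BLOCKS table by direct arithmetic on the minute value
-- (block index, bounds, and a %02d-formatted label); same return value everywhere.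

-- ===== PORT A =====
-- h, m = map(int, t_str.split(":")) ; any exception (wrong arity, ValueError) → -1
def time_to_minutes (t_str : String) : Int :=
  match PySem.Str.split? t_str ":" with
  | some [a, b] =>
    match PySem.Int.ofStr? a, PySem.Int.ofStr? b with
    | some h, some m => h * 60 + m
    | _, _ => -1
  | _ => -1

def TIME_BLOCKS : List (String × (Int × Int) × (Int × Int)) :=
  [("09:30-10:30", (9, 30), (10, 30)),
   ("10:30-11:30", (10, 30), (11, 30)),
   ("11:30-12:30", (11, 30), (12, 30)),
   ("12:30-13:30", (12, 30), (13, 30)),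
   ("13:30-14:30", (13, 30), (14, 30)),
   ("14:30-15:30", (14, 30), (15, 30)),
   ("15:30-16:00", (15, 30), (16, 0))]

-- the for-loop with early return: first block whose window contains mins
def scanBlocks (blocks : List (String × (Int × Int) × (Int × Int))) (mins : Int) : Option String :=
  match blocks with
  | [] => none
  | (label, (sh, sm), (eh, em)) :: rest =>
    if sh * 60 + sm ≤ mins ∧ mins < eh * 60 + em then some label else scanBlocks rest mins

def get_time_block (t_str : String) : String :=
  let mins := time_to_minutes t_str
  if mins < 0 then "Unknown"
  else
    match scanBlocks TIME_BLOCKS mins with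
    | some label => label
    | none => if mins < 9 * 60 + 30 then "Pre-market" else "After-hours"

-- ===== PORT B =====
def time_to_minutes_alt (t_str : String) : Int :=
  match PySem.Str.split? t_str ":" with
  | some [a, b] =>
    match PySem.Int.ofStr? a, PySem.Int.ofStr? b with
    | some h, some m => h * 60 + m
    | _, _ => -1
  | _ => -1

-- "%02d" for 0 ≤ n ≤ 99 (the only values B formats): zero-pad str(n) to width 2; exact there
def pad2 (n : Int) : String :=
  if n < 10 then "0" ++ PySem.Int.toStr n else PySem.Int.toStr n

def get_time_block_alt (t_str : String) : String :=
  let mins := time_to_minutes_alt t_str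
  if mins < 0 then "Unknown"
  else if mins < 570 then "Pre-market"
  else if 960 ≤ mins then "After-hours"
  else
    let start := 570 + 60 * PySem.Int.floordiv (mins - 570) 60
    let «end» := min (start + 60) 960
    pad2 (PySem.Int.floordiv start 60) ++ ":" ++ pad2 (PySem.Int.mod start 60) ++ "-" ++
      pad2 (PySem.Int.floordiv «end» 60) ++ ":" ++ pad2 (PySem.Int.mod «end» 60)

-- ===== PRECONDITION & SPEC =====
def Spec_get_time_block (t_str : String) (out : String) : Prop := out = get_time_block_alt t_str
instance (t_str : String) (out : String) : Decidable (Spec_get_time_block t_str out) := by unfold Spec_get_time_block; infer_instance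

-- ===== CLAIM (what is proved, stated in full; the proofs are below) =====
def Claim_equal_get_time_block : Prop := ∀ (t_str : String), Dom_get_time_block t_str → Spec_get_time_block t_str (get_time_block t_str)

-- ===== LEMMAS AND PROOFS =====
theorem tm_alt_eq (t : String) : time_to_minutes_alt t = time_to_minutes t := rfl

theorem fdiv_block (j : Int) {m : Int} (h1 : 570 + 60 * j ≤ m) (h2 : m < 630 + 60 * j) :
    PySem.Int.floordiv (m - 570) 60 = j := by
  rw [PySem.Int.floordiv_eq_iff_of_pos (by norm_num)]
  omega

theorem tails_eq (m : Int) :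
    (match scanBlocks TIME_BLOCKS m with
     | some label => label
     | none => if m < 9 * 60 + 30 then "Pre-market" else "After-hours") =
    (if m < 570 then "Pre-market"
     else if 960 ≤ m then "After-hours"
     else
       let start := 570 + 60 * PySem.Int.floordiv (m - 570) 60
       let «end» := min (start + 60) 960
       pad2 (PySem.Int.floordiv start 60) ++ ":" ++ pad2 (PySem.Int.mod start 60) ++ "-" ++
         pad2 (PySem.Int.floordiv «end» 60) ++ ":" ++ pad2 (PySem.Int.mod «end» 60)) := by
  simp only [TIME_BLOCKS, scanBlocks]
  by_cases c0 : 570 ≤ m ∧ m < 630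
  · rw [fdiv_block 0 (by omega) (by omega)]; simp [c0]; split_ifs <;> first | rfl | omega
  · by_cases c1 : 630 ≤ m ∧ m < 690
    · rw [fdiv_block 1 (by omega) (by omega)]; simp [c0, c1]; split_ifs <;> first | rfl | omega
    · by_cases c2 : 690 ≤ m ∧ m < 750
      · rw [fdiv_block 2 (by omega) (by omega)]; simp [c0, c1, c2]; split_ifs <;> first | rfl | omega
      · by_cases c3 : 750 ≤ m ∧ m < 810
        · rw [fdiv_block 3 (by omega) (by omega)]; simp [c0, c1, c2, c3]; split_ifs <;> first | rfl | omega
        · by_cases c4 : 810 ≤ m ∧ m < 870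
          · rw [fdiv_block 4 (by omega) (by omega)]; simp [c0, c1, c2, c3, c4]; split_ifs <;> first | rfl | omega
          · by_cases c5 : 870 ≤ m ∧ m < 930
            · rw [fdiv_block 5 (by omega) (by omega)]; simp [c0, c1, c2, c3, c4, c5]; split_ifs <;> first | rfl | omega
            · by_cases c6 : 930 ≤ m ∧ m < 960
              · rw [fdiv_block 6 (by omega) (by omega)]; simp [c0, c1, c2, c3, c4, c5, c6]; split_ifs <;> first | rfl | omega
              · simp [c0, c1, c2, c3, c4, c5, c6]; split_ifs <;> first | rfl | omega

-- ===== VERDICT (by name: the statement is the Claim_ definition above) =====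
theorem get_time_block_spec : Claim_equal_get_time_block := by
  intro t _
  show get_time_block t = get_time_block_alt t
  unfold get_time_block get_time_block_alt
  rw [tm_alt_eq]
  generalize time_to_minutes t = m
  by_cases h0 : m < 0
  · simp [h0]
  · simp only [h0, if_false]
    exact tails_eq m
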